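-- pv_equiv track=rewrite | github.com/ThorstenBigT/cat_coder | addictive_game/level2/main.py | match_tuples
-- ===== SOURCE A (Python) =====
-- from typing import TypedDict, List, Tuple, Dict
--
-- def match_tuples(tuples: List[Tuple[int, int]]) -> Dict[int, List[Tuple[int, int]]]:
--     tuple_dict = {}
--     for tuple in tuples:
--         second_number = tuple[1]
--         if second_number in tuple_dict:
--             tuple_dict[second_number].append(tuple)
--         else:
--             tuple_dict[second_number] = [tuple]
--     tuple_dict = dict(sorted(tuple_dict.items()))
--     return tuple_dict
-- ===== SOURCE B (Python) =====
-- def match_tuples(tuples):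
--     # B: compute the sorted distinct second elements, then one filter pass per key.
--     keys = sorted({t[1] for t in tuples})
--     return {k: [t for t in tuples if t[1] == k] for k in keys}
-- ===== Notes on version B (the rewrite author's own statement) =====
-- stated objective: simpler
-- what changed: Instead of building a dict by conditional append during one scan and then sorting its items, B first computes the sorted set of distinct second elements and builds the result with one filtering comprehension per key.
import Mathlib
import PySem

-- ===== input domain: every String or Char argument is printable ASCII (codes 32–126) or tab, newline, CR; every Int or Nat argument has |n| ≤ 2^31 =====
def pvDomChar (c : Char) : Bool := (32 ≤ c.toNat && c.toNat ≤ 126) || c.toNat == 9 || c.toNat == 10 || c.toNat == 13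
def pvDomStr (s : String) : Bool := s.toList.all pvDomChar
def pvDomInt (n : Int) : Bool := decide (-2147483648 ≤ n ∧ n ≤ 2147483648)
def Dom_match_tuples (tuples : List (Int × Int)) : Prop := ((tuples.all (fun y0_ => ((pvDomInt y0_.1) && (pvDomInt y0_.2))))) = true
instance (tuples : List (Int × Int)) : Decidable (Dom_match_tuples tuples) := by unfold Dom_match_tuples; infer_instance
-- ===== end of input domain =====

-- B replaces A's dict-building scan + item sort by: sorted distinct keys, then one filter per key (simpler, no dict).

-- ===== PORT A =====
-- loop body: if second_number in tuple_dict: append; else: start a new singleton list.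
-- sorted(tuple_dict.items()) compares (key, value) tuples, but dict keys are distinct, so the
-- comparison never reaches the list component: ported as a sort keyed on the first component.
def match_tuples (tuples : List (Int × Int)) : List (Int × List (Int × Int)) :=
  let d := tuples.foldl
    (fun d t =>
      if d.contains t.2 then d.modify t.2 [] (· ++ [t]) else d.insert t.2 [t])
    PySem.Dict.empty
  PySem.List.sorted d.items (fun p => p.1) false

-- ===== PORT B =====
def match_tuples_alt (tuples : List (Int × Int)) : List (Int × List (Int × Int)) :=
  let keys := PySem.List.sorted (PySem.Set.ofList (tuples.map (·.2))) (fun x => x) false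
  keys.map (fun k => (k, tuples.filter (fun t => t.2 == k)))

-- ===== PRECONDITION & SPEC =====
def Spec_match_tuples (tuples : List (Int × Int)) (out : List (Int × List (Int × Int))) : Prop := out = match_tuples_alt tuples
instance (tuples : List (Int × Int)) (out : List (Int × List (Int × Int))) : Decidable (Spec_match_tuples tuples out) := by unfold Spec_match_tuples; infer_instance

-- ===== CLAIM (what is proved, stated in full; the proofs are below) =====
def Claim_equal_match_tuples : Prop := ∀ (tuples : List (Int × Int)), Dom_match_tuples tuples → Spec_match_tuples tuples (match_tuples tuples)

-- ===== LEMMAS AND PROOFS =====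

-- A's conditional loop body is exactly Dict.modify with default [].
theorem mt_step_eq (d : PySem.Dict Int (List (Int × Int))) (t : Int × Int) :
    (if d.contains t.2 then d.modify t.2 [] (· ++ [t]) else d.insert t.2 [t])
      = d.modify t.2 [] (· ++ [t]) := by
  by_cases h : d.contains t.2 <;>
    simp [PySem.Dict.modify, h, PySem.Dict.getD_of_not_contains]

-- The dict A builds, as the modify-loop over (second, tuple) pairs.
theorem mt_fold_eq (tuples : List (Int × Int)) :
    tuples.foldl
      (fun d t => if d.contains t.2 then d.modify t.2 [] (· ++ [t]) else d.insert t.2 [t])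
      PySem.Dict.empty
    = (tuples.map (fun t => (t.2, t))).foldl
        (fun d p => d.modify p.1 [] (· ++ [p.2])) PySem.Dict.empty := by
  rw [List.foldl_map]
  exact List.foldl_ext _ _ PySem.Dict.empty (fun d t _ => mt_step_eq d t)

-- Each group A stores under key k is the filter of the input at that key.
theorem mt_getD (tuples : List (Int × Int)) (k : Int) :
    ((tuples.map (fun t => (t.2, t))).foldl
        (fun d p => d.modify p.1 [] (· ++ [p.2])) PySem.Dict.empty).getD k []
      = tuples.filter (fun t => t.2 == k) := by
  rw [PySem.Dict.getD_foldl_modify_append]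
  simp [List.filter_map, Function.comp_def]

theorem match_tuples_eq_alt (tuples : List (Int × Int)) :
    match_tuples tuples = match_tuples_alt tuples := by
  unfold match_tuples match_tuples_alt
  rw [mt_fold_eq]
  set l := tuples.map (fun t => (t.2, t)) with hl
  set d := l.foldl (fun d p => d.modify p.1 [] (· ++ [p.2])) PySem.Dict.empty with hd
  have hkeys : d.keys = PySem.Set.ofList (tuples.map (·.2)) := by
    rw [hd, PySem.Dict.keys_foldl_modify_key]
    simp [hl, PySem.Set.update, List.map_map, Function.comp_def,
      PySem.Set.ofList_eq_foldl, PySem.Dict.keys_empty]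
  have hnd : d.keys.Nodup := by
    rw [hd]
    exact PySem.Dict.nodup_keys_foldl_modify_key l Prod.fst [] (fun d p => (· ++ [p.2]))
      PySem.Dict.empty (by simp [PySem.Dict.keys_empty])
  have hitems : d.items = d.keys.map (fun k => (k, d.getD k [])) :=
    PySem.Dict.items_eq_map_keys d hnd []
  have hval : ∀ k, d.getD k [] = tuples.filter (fun t => t.2 == k) := fun k => mt_getD tuples k
  -- Name the sorted order of A's items directly as B's list.
  apply PySem.List.sorted_eq_of_perm_of_pairwise_lt
  · -- permutation: B's list is a rearrangement of A's items
    have hperm : (PySem.List.sorted (PySem.Set.ofList (tuples.map (·.2))) (fun x => x) false).Perm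
        (PySem.Set.ofList (tuples.map (·.2))) := PySem.List.sorted_perm _ _ _
    calc ((PySem.List.sorted (PySem.Set.ofList (tuples.map (·.2))) (fun x => x) false).map
            (fun k => (k, tuples.filter (fun t => t.2 == k)))).Perm
          ((PySem.Set.ofList (tuples.map (·.2))).map
            (fun k => (k, tuples.filter (fun t => t.2 == k)))) := hperm.map _
      _ = d.items := by
            rw [hitems, hkeys]
            exact (List.map_congr_left fun k _ => by rw [hval k]).symm
  · -- strictly increasing on the key
    rw [List.pairwise_map]
    exact PySem.List.sorted_ofList_pairwise_lt (tuples.map (·.2))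

-- ===== VERDICT (by name: the statement is the Claim_ definition above) =====
theorem match_tuples_spec : Claim_equal_match_tuples :=
  fun tuples _ => match_tuples_eq_alt tuples
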